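-- pv_equiv track=rewrite | github.com/ikaera/TIP_technical_interview_prep | 02_Dictionaries_Problems/advanced.py | find_duplicate_chests
-- ===== SOURCE A (Python) =====
-- def find_duplicate_chests(chests):
--     chests_set = set()
--     result = []
--     for chest in chests:
--         if chest in chests_set:
--             result.append(chest)
--         else:
--             chests_set.add(chest)
--     return result
-- ===== SOURCE B (Python) =====
-- def find_duplicate_chests(chests):
--     first = {}
--     for i, c in enumerate(chests):
--         first.setdefault(c, i)
--     return [c for i, c in enumerate(chests) if first[c] != i]
-- ===== Notes on version B (the rewrite author's own statement) =====
-- stated objective: alternative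
-- what changed: Replaced the single-pass seen-set accumulator by two staged passes: first build a table mapping each chest to the index of its earliest occurrence, then filter by comparing each position's index against that table entry.
import Mathlib
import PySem

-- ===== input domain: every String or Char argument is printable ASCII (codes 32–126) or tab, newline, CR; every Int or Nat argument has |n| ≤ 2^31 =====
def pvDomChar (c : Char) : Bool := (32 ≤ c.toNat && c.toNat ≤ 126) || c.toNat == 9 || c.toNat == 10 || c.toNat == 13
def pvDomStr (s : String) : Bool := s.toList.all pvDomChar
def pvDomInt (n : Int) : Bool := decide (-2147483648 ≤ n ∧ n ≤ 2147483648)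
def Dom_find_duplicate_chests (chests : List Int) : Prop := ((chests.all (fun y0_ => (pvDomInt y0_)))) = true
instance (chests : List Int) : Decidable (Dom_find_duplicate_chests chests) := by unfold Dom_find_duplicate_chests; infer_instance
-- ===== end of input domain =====

-- B replaces A's single-pass seen-set accumulator by two staged passes: build a table of each
-- chest's first-occurrence index, then filter positions whose index differs from that entry
-- (alternative decomposition, same cost).


-- ===== PORT A =====
def find_duplicate_chests (chests : List Int) : List Int :=
  (chests.foldl
    (fun (st : PySem.Set Int × List Int) chest =>
      if PySem.Set.contains st.1 chest then (st.1, st.2 ++ [chest])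
      else (PySem.Set.add st.1 chest, st.2))
    ((PySem.Set.empty : PySem.Set Int), ([] : List Int))).2

-- ===== PORT B =====
-- Pass 1: `first.setdefault(c, i)` over enumerate; pass 2: keep `c` where `first[c] != i`.
-- Python's `first[c]` always succeeds here (every chest was inserted in pass 1), so the
-- lookup is ported as `get? p.2 ≠ some p.1`, exact on keys that are present.
def find_duplicate_chests_alt (chests : List Int) : List Int :=
  let first := (PySem.List.enumerate chests).foldl
    (fun (d : PySem.Dict Int Int) p => d.setdefault p.2 p.1) PySem.Dict.empty
  ((PySem.List.enumerate chests).filter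
      (fun p => decide (first.get? p.2 ≠ some p.1))).map (·.2)

-- ===== PRECONDITION & SPEC =====
def Spec_find_duplicate_chests (chests : List Int) (out : List Int) : Prop := out = find_duplicate_chests_alt chests
instance (chests : List Int) (out : List Int) : Decidable (Spec_find_duplicate_chests chests out) := by unfold Spec_find_duplicate_chests; infer_instance

-- ===== CLAIM (what is proved, stated in full; the proofs are below) =====
def Claim_equal_find_duplicate_chests : Prop := ∀ (chests : List Int), Dom_find_duplicate_chests chests → Spec_find_duplicate_chests chests (find_duplicate_chests chests)

-- ===== LEMMAS AND PROOFS =====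

/-- Canonical "occurrences after the first", relative to an already-seen prefix `pre`. -/
def dupAux (pre l : List Int) : List Int :=
  match l with
  | [] => []
  | c :: l => if c ∈ pre then c :: dupAux (pre ++ [c]) l else dupAux (pre ++ [c]) l

/-- Index (counting from `k`) of the first occurrence of `c` in `l`, if any. -/
def firstIdx? (l : List Int) (k : Int) (c : Int) : Option Int :=
  match l with
  | [] => none
  | x :: l => if x = c then some k else firstIdx? l (k + 1) c

lemma firstIdx?_none_iff (l : List Int) : ∀ (k c : Int), firstIdx? l k c = none ↔ c ∉ l := by
  induction l with
  | nil => simp [firstIdx?]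
  | cons x l ih =>
    intro k c
    by_cases hx : x = c <;> simp [firstIdx?, hx, ih (k + 1) c, eq_comm]

lemma firstIdx?_bounds (l : List Int) : ∀ (k c j : Int), firstIdx? l k c = some j →
    k ≤ j ∧ j < k + l.length := by
  induction l with
  | nil => intro k c j h; simp [firstIdx?] at h
  | cons x l ih =>
    intro k c j h
    by_cases hx : x = c
    · rw [firstIdx?, if_pos hx] at h
      injection h with h; subst h
      refine ⟨le_refl k, ?_⟩
      have hl : ((x :: l).length : Int) = (l.length : Int) + 1 := by simp
      omega
    · rw [firstIdx?, if_neg hx] at h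
      have := ih (k + 1) c j h
      constructor <;> [omega; (simp; omega)]

lemma firstIdx?_append (a b : List Int) : ∀ (k c : Int),
    firstIdx? (a ++ b) k c = (firstIdx? a k c).or (firstIdx? b (k + a.length) c) := by
  induction a with
  | nil => simp [firstIdx?]
  | cons x a ih =>
    intro k c
    by_cases hx : x = c
    · simp [firstIdx?, hx]
    · rw [List.cons_append, firstIdx?, if_neg hx, firstIdx?, if_neg hx, ih (k + 1) c]
      congr 1
      simp; ring_nf

lemma setdefault_get? (d : PySem.Dict Int Int) (k v c : Int) :
    (d.setdefault k v).get? c = (d.get? c).or (if c = k then some v else none) := by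
  have hsd : d.setdefault k v = if d.contains k then d else d.insert k v := by
    by_cases h : d.contains k
    · simp [PySem.Dict.setdefault, h]
    · have h' : d.contains k = false := by simpa using h
      apply PySem.Dict.ext
      rw [if_neg h, PySem.Dict.items_insert_of_not_contains d v h']
      simp [PySem.Dict.setdefault, h]
  rw [hsd]
  by_cases h : d.contains k
  · rw [if_pos h]
    by_cases hc : c = k
    · subst hc
      have hs : (d.get? c).isSome := by
        rw [← PySem.Dict.contains_eq_isSome_get? d c]; exact h
      rcases Option.isSome_iff_exists.1 hs with ⟨w, hw⟩
      simp [hw]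
    · simp [hc]
  · rw [if_neg h, PySem.Dict.get?_insert]
    by_cases hc : c = k
    · subst hc
      have : d.get? c = none := by
        rw [PySem.Dict.get?_eq_none_iff_contains]; simpa using h
      simp [this]
    · simp [hc]

lemma build_get (l : List Int) : ∀ (d : PySem.Dict Int Int) (k c : Int),
    ((PySem.List.enumerate l k).foldl
        (fun (d : PySem.Dict Int Int) p => d.setdefault p.2 p.1) d).get? c
      = (d.get? c).or (firstIdx? l k c) := by
  induction l with
  | nil => intro d k c; simp [PySem.List.enumerate_nil, firstIdx?]
  | cons x l ih =>
    intro d k c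
    rw [PySem.List.enumerate_cons, List.foldl_cons, ih, setdefault_get?, Option.or_assoc]
    congr 1
    by_cases hx : x = c
    · simp [firstIdx?, hx]
    · rw [if_neg (fun h => hx h.symm), Option.none_or, firstIdx?, if_neg hx]

lemma portA_foldl (l : List Int) : ∀ (pre : List Int) (s : PySem.Set Int) (acc : List Int),
    (∀ x : Int, x ∈ s ↔ x ∈ pre) →
    (l.foldl
      (fun (st : PySem.Set Int × List Int) chest =>
        if PySem.Set.contains st.1 chest then (st.1, st.2 ++ [chest])
        else (PySem.Set.add st.1 chest, st.2))
      (s, acc)).2 = acc ++ dupAux pre l := by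
  induction l with
  | nil => intro pre s acc _; simp [dupAux]
  | cons c l ih =>
    intro pre s acc hs
    simp only [List.foldl_cons, dupAux]
    by_cases hc : c ∈ pre
    · rw [if_pos (by simpa [hs c] using hc), if_pos hc,
        ih (pre ++ [c]) s (acc ++ [c]) (by
          intro x
          rw [hs x, List.mem_append, List.mem_singleton]
          exact ⟨Or.inl, fun h => h.elim id (fun e => e ▸ hc)⟩)]
      simp
    · rw [if_neg (by simpa [hs c] using hc), if_neg hc,
        ih (pre ++ [c]) (PySem.Set.add s c) acc (by
          intro x
          rw [PySem.Set.mem_add, hs x, List.mem_append, List.mem_singleton])]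

lemma portB_filter (l : List Int) : ∀ (pre : List Int) (F : PySem.Dict Int Int),
    (∀ c : Int, F.get? c = firstIdx? (pre ++ l) 0 c) →
    ((PySem.List.enumerate l (pre.length : Int)).filter
        (fun p => decide (F.get? p.2 ≠ some p.1))).map (·.2) = dupAux pre l := by
  induction l with
  | nil => intro pre F _; simp [PySem.List.enumerate_nil, dupAux]
  | cons c l ih =>
    intro pre F hF
    rw [PySem.List.enumerate_cons, List.filter_cons]
    have hFc : F.get? c = (firstIdx? pre 0 c).or (some (pre.length : Int)) := by
      rw [hF c, firstIdx?_append]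
      congr 1
      simp [firstIdx?]
    have hih := ih (pre ++ [c]) F (by
      intro c'
      rw [hF c']
      congr 1
      simp)
    rw [show ((pre ++ [c]).length : Int) = (pre.length : Int) + 1 by simp] at hih
    by_cases hc : c ∈ pre
    · have : ∃ j, firstIdx? pre 0 c = some j := by
        cases h : firstIdx? pre 0 c with
        | none => exact absurd ((firstIdx?_none_iff pre 0 c).1 h) (by simpa using hc)
        | some j => exact ⟨j, rfl⟩
      rcases this with ⟨j, hj⟩
      have hjlt := (firstIdx?_bounds pre 0 c j hj).2
      rw [if_pos (by
        simp only [hFc, hj, Option.some_or, decide_eq_true_eq, ne_eq, Option.some.injEq]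
        omega), List.map_cons, hih]
      simp [dupAux, hc]
    · have hnone : firstIdx? pre 0 c = none := (firstIdx?_none_iff pre 0 c).2 hc
      rw [if_neg (by simp [hFc, hnone]), hih]
      simp [dupAux, hc]

-- ===== VERDICT (by name: the statement is the Claim_ definition above) =====
theorem find_duplicate_chests_spec : Claim_equal_find_duplicate_chests := by
  intro chests _
  show find_duplicate_chests chests = find_duplicate_chests_alt chests
  have hA := portA_foldl chests [] (PySem.Set.empty) []
    (by intro x; simp [PySem.Set.empty])
  have hB := portB_filter chests []
    ((PySem.List.enumerate chests).foldl
      (fun (d : PySem.Dict Int Int) p => d.setdefault p.2 p.1) PySem.Dict.empty)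
    (by
      intro c
      rw [show PySem.List.enumerate chests = PySem.List.enumerate chests 0 from rfl,
        build_get chests PySem.Dict.empty 0 c]
      simp [PySem.Dict.get?_empty])
  simp only [List.nil_append, List.length_nil, Nat.cast_zero] at hA hB
  rw [find_duplicate_chests, hA, find_duplicate_chests_alt, ← hB]
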